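-- pv_equiv track=rewrite | github.com/aditdp/gmt_pyplotter_v2.0 | percobaan.py | recommend_dem_resolution
-- ===== SOURCE A (Python) =====
-- RECOMMENDED_DEM_RESOLUTION_MAP = {
--     # Map Scale Denominator Upper Bound : Recommended DEM Resolution String
--     2000: "1s",  # For map scales up to 1:2000, recommend 1 arc-second resolution
--     7500: "3s",  # For map scales up to 1:7500, recommend 3 arc-seconds resolution
--     15000: "15s",  # For map scales up to 1:15000, recommend 15 arc-seconds resolution
--     35000: "30s",  # For map scales up to 1:35000, recommend 30 arc-seconds resolution
--     75000: "1m",  # For map scales up to 1:75000, recommend 1 arc-minute resolution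
--     150000: "2m",  # For map scales up to 1:150000, recommend 2 arc-minutes resolution
--     250000: "3m",  # For map scales up to 1:250000, recommend 3 arc-minutes resolution
--     500000: "5m",  # For map scales up to 1:500000, recommend 5 arc-minutes resolution
--     1000000: "10m",  # For map scales up to 1:1000000, recommend 10 arc-minutes resolution
--     2500000: "15m",  # For map scales up to 1:2500000, recommend 15 arc-minutes resolution
--     5000000: "30m",  # For map scales up to 1:5000000, recommend 30 arc-minutes resolution
--     float("inf"): "1deg",  # For any larger map scale, recommend 1 degree resolution
-- }
--
-- def recommend_dem_resolution(map_scale_denominator):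
--     """
--     Recommends a suitable DEM resolution (in a standard format like "1s", "5m", or "1deg")
--     based on the map scale.
--
--     Args:
--         map_scale_denominator (int): The denominator of the map's representative fraction scale
--                                      (e.g., 10000 for 1:10000).
--
--     Returns:
--         str: The recommended DEM resolution in string format, or None if input is invalid.
--     """
--
--     if (
--         not isinstance(map_scale_denominator, (int, float))
--         or map_scale_denominator <= 0
--     ):
--         return None
--
--     # Iterate through the sorted thresholds to find the appropriate resolution
--     # The dictionary keys are already sorted in ascending order.
--     for threshold, dem_res_string in RECOMMENDED_DEM_RESOLUTION_MAP.items():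
--         if map_scale_denominator <= threshold:
--             return dem_res_string
--
--     return None  # Should not be reached due to float('inf') as the last threshold
-- ===== SOURCE B (Python) =====
-- _THRESHOLDS = [2000, 7500, 15000, 35000, 75000, 150000, 250000, 500000, 1000000, 2500000, 5000000]
-- _RESOLUTIONS = ["1s", "3s", "15s", "30s", "1m", "2m", "3m", "5m", "10m", "15m", "30m", "1deg"]
--
--
-- def recommend_dem_resolution(map_scale_denominator):
--     if (
--         not isinstance(map_scale_denominator, (int, float))
--         or map_scale_denominator <= 0
--         or map_scale_denominator != map_scale_denominator  # reject NaN
--     ):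
--         return None
--     # Binary search for the first threshold >= the input; index len(_THRESHOLDS)
--     # (no finite threshold large enough) selects the final "1deg" entry.
--     lo, hi = 0, len(_THRESHOLDS)
--     while lo < hi:
--         mid = (lo + hi) // 2
--         if _THRESHOLDS[mid] < map_scale_denominator:
--             lo = mid + 1
--         else:
--             hi = mid
--     return _RESOLUTIONS[lo]
-- ===== Notes on version B (the rewrite author's own statement) =====
-- stated objective: alternative
-- what changed: B stores the table as two parallel sorted lists and finds the first threshold >= the input by binary search instead of A's in-order scan of the dict.
import Mathlib
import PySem

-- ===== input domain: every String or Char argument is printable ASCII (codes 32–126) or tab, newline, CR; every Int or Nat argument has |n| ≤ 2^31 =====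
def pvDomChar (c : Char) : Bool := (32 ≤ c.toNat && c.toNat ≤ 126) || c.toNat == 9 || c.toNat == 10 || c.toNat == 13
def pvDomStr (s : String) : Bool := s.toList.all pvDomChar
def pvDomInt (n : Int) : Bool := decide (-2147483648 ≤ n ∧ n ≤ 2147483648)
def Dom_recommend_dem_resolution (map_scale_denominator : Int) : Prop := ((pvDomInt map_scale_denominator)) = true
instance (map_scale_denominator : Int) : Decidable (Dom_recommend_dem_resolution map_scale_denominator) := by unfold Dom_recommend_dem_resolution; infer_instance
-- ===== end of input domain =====

-- B replaces A's linear scan of the threshold table with a binary search over a sorted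
-- threshold list (objective: alternative; the table is tiny, so no speed is claimed).

-- ===== PORT A =====
-- The dict's keys are all Int except the final float('inf'); we model each key as
-- Option Int with none = float('inf').  For an Int input x, 'x <= float("inf")' is
-- always True in Python, which is exactly how the 'none' case is rendered below.
def pvMapA : List (Option Int × String) :=
  [(some 2000, "1s"), (some 7500, "3s"), (some 15000, "15s"), (some 35000, "30s"),
   (some 75000, "1m"), (some 150000, "2m"), (some 250000, "3m"), (some 500000, "5m"),
   (some 1000000, "10m"), (some 2500000, "15m"), (some 5000000, "30m"), (none, "1deg")]

-- the 'for threshold, dem_res_string in …: if x <= threshold: return …' loop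
def pvScanA (x : Int) : List (Option Int × String) → Option String
  | [] => none
  | (threshold, dem_res_string) :: rest =>
      if (match threshold with | some t => decide (x ≤ t) | none => true) then some dem_res_string
      else pvScanA x rest

def recommend_dem_resolution (map_scale_denominator : Int) : Option String :=
  -- isinstance(x, (int, float)) is always True for an Int input
  if map_scale_denominator ≤ 0 then none
  else pvScanA map_scale_denominator pvMapA

-- ===== PORT B =====
def pvThresholdsB : List Int :=
  [2000, 7500, 15000, 35000, 75000, 150000, 250000, 500000, 1000000, 2500000, 5000000]
def pvResolutionsB : List String :=
  ["1s", "3s", "15s", "30s", "1m", "2m", "3m", "5m", "10m", "15m", "30m", "1deg"]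

-- the while-loop of Source B; lo/hi are list indices so Nat with Nat '/' matches Python's '//'
def pvBsearchB (x : Int) (lo hi : Nat) : Nat :=
  if _h : lo < hi then
    let mid := (lo + hi) / 2
    if pvThresholdsB.getD mid 0 < x then pvBsearchB x (mid + 1) hi
    else pvBsearchB x lo mid
  else lo
termination_by hi - lo
decreasing_by all_goals omega

def recommend_dem_resolution_alt (map_scale_denominator : Int) : Option String :=
  -- the Int input is never NaN, so the 'x != x' guard of Source B is always False here
  if map_scale_denominator ≤ 0 then none
  else some (pvResolutionsB.getD (pvBsearchB map_scale_denominator 0 pvThresholdsB.length) "")  -- the index is always in range 0..11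

-- ===== PRECONDITION & SPEC =====
def Spec_recommend_dem_resolution (map_scale_denominator : Int) (out : Option String) : Prop := out = recommend_dem_resolution_alt map_scale_denominator
instance (map_scale_denominator : Int) (out : Option String) : Decidable (Spec_recommend_dem_resolution map_scale_denominator out) := by unfold Spec_recommend_dem_resolution; infer_instance

-- ===== CLAIM (what is proved, stated in full; the proofs are below) =====
def Claim_equal_recommend_dem_resolution : Prop := ∀ (map_scale_denominator : Int), Dom_recommend_dem_resolution map_scale_denominator → Spec_recommend_dem_resolution map_scale_denominator (recommend_dem_resolution map_scale_denominator)

-- ===== LEMMAS AND PROOFS =====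

-- ===== VERDICT (by name: the statement is the Claim_ definition above) =====
set_option maxHeartbeats 2000000 in
theorem recommend_dem_resolution_spec : Claim_equal_recommend_dem_resolution := by
  intro x _
  unfold Spec_recommend_dem_resolution recommend_dem_resolution recommend_dem_resolution_alt
  by_cases h0 : x ≤ 0
  · simp [h0]
  · simp only [h0, if_false]
    simp only [pvMapA, pvScanA, pvThresholdsB, pvResolutionsB, List.length]
    simp [pvBsearchB, pvThresholdsB, List.getD]
    split_ifs <;> first | rfl | omega
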